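-- pv_equiv track=rewrite | github.com/nicholashui/grok-research-agent | grok_research_agent/workflow_phases.py | _split_report_sections
-- ===== SOURCE A (Python) =====
-- def _split_report_sections(report_md: str) -> list[tuple[str, str]]:
--     sections: list[tuple[str, str]] = []
--     current_title: str | None = None
--     current_lines: list[str] = []
--     for line in report_md.splitlines():
--         if line.startswith("## "):
--             if current_title is not None:
--                 sections.append((current_title, "\n".join(current_lines).strip()))
--             current_title = line[3:].strip()
--             current_lines = []
--             continue
--         if current_title is None:
--             continue
--         current_lines.append(line)
--     if current_title is not None:
--         sections.append((current_title, "\n".join(current_lines).strip()))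
--     return sections
-- ===== SOURCE B (Python) =====
-- def _split_report_sections(report_md: str) -> list[tuple[str, str]]:
--     # Single backward pass: walking the lines in reverse, a header line closes the
--     # section formed by the (reversed) body lines seen since the previous header,
--     # so no Optional title state and no end-of-loop flush are needed; any lines
--     # before the first header simply remain in `body` and are discarded.
--     sections: list[tuple[str, str]] = []
--     body: list[str] = []
--     for line in reversed(report_md.splitlines()):
--         if line.startswith("## "):
--             sections.append((line[3:].strip(), "\n".join(reversed(body)).strip()))
--             body = []
--         else:
--             body.append(line)
--     sections.reverse()
--     return sections
-- ===== Notes on version B (the rewrite author's own statement) =====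
-- stated objective: alternative
-- what changed: Replaces A's forward accumulate-and-flush loop (Optional current_title state plus an end-of-loop flush) by a single backward pass in which each header line closes the body collected since the previous header, so no title state and no final flush exist.
import Mathlib
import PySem

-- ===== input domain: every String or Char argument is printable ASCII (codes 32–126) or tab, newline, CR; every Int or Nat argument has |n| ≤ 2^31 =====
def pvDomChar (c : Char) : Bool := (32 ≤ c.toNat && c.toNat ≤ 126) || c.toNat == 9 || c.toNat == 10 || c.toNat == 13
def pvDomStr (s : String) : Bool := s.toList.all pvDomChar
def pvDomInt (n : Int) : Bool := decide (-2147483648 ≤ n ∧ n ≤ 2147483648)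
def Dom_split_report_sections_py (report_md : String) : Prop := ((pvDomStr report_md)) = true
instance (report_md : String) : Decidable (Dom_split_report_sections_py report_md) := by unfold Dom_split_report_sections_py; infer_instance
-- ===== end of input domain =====

-- B replaces A's Optional-title accumulator with end-of-loop flush by a single
-- backward pass in which each header line closes the body collected since the
-- previous header (objective: alternative, same cost).

-- ===== PORT A =====
-- forward loop: state (sections, current_title?, current_lines), flush at headers and at the end
def pvALoop : List String → List (String × String) → Option String → List String → List (String × String)
  | [], sections, none, _ => sections
  | [], sections, some t, cur =>
      sections ++ [(t, PySem.Str.strip (PySem.Str.join "\n" cur))]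
  | line :: rest, sections, t?, cur =>
      if PySem.Str.startswith line "## " then
        pvALoop rest
          (match t? with
           | none => sections
           | some t => sections ++ [(t, PySem.Str.strip (PySem.Str.join "\n" cur))])
          (some (PySem.Str.strip (PySem.Str.slice line (some 3) none))) []
      else
        match t? with
        | none => pvALoop rest sections none cur
        | some t => pvALoop rest sections (some t) (cur ++ [line])

def split_report_sections_py (report_md : String) : List (String × String) :=
  pvALoop (PySem.Str.splitlines report_md) [] none []

-- ===== PORT B =====
-- one step of the backward pass: state (sections-in-reverse-order, body-in-reverse-order)
def pvBStep (acc : List (String × String) × List String) (line : String) :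
    List (String × String) × List String :=
  if PySem.Str.startswith line "## " then
    (acc.1 ++ [(PySem.Str.strip (PySem.Str.slice line (some 3) none),
                PySem.Str.strip (PySem.Str.join "\n" acc.2.reverse))], [])
  else
    (acc.1, acc.2 ++ [line])

def split_report_sections_py_alt (report_md : String) : List (String × String) :=
  (((PySem.Str.splitlines report_md).reverse.foldl pvBStep ([], [])).1).reverse

-- ===== PRECONDITION & SPEC =====
def Spec_split_report_sections_py (report_md : String) (out : List (String × String)) : Prop := out = split_report_sections_py_alt report_md
instance (report_md : String) (out : List (String × String)) : Decidable (Spec_split_report_sections_py report_md out) := by unfold Spec_split_report_sections_py; infer_instance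

-- ===== CLAIM (what is proved, stated in full; the proofs are below) =====
def Claim_equal_split_report_sections_py : Prop := ∀ (report_md : String), Dom_split_report_sections_py report_md → Spec_split_report_sections_py report_md (split_report_sections_py report_md)

-- ===== LEMMAS AND PROOFS =====

-- Invariant linking A's forward accumulator loop to B's backward fold: after B has
-- consumed `ls` (reversed), its body component holds the header-free prefix of `ls`
-- reversed, and its sections component holds (reversed) exactly what A still emits.
theorem pvMain (ls : List String) :
    ∀ (secs : List (String × String)) (t? : Option String) (cur : List String),
    pvALoop ls secs t? cur =
      match t? with
      | none => secs ++ (ls.reverse.foldl pvBStep ([], [])).1.reverse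
      | some t =>
          secs ++
            (t, PySem.Str.strip (PySem.Str.join "\n"
                  (cur ++ (ls.reverse.foldl pvBStep ([], [])).2.reverse))) ::
              (ls.reverse.foldl pvBStep ([], [])).1.reverse := by
  induction ls with
  | nil =>
      intro secs t? cur
      cases t? <;> simp [pvALoop]
  | cons l ls ih =>
      intro secs t? cur
      have hb : (l :: ls).reverse.foldl pvBStep ([], [])
          = pvBStep (ls.reverse.foldl pvBStep ([], [])) l := by
        simp [List.foldl_append]
      rw [hb]
      by_cases h : PySem.Str.startswith l "## " = true <;>
        simp at h <;>
        cases t? <;>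
        simp [pvALoop, pvBStep, h, ih, List.append_assoc]

-- ===== VERDICT (by name: the statement is the Claim_ definition above) =====
theorem split_report_sections_py_spec : Claim_equal_split_report_sections_py := by
  intro report_md _
  unfold Spec_split_report_sections_py split_report_sections_py split_report_sections_py_alt
  simpa using pvMain (PySem.Str.splitlines report_md) [] none []
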